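-- pv_equiv track=rewrite | github.com/IncognitoPeter/informatyka_korki | moduł_4_tablice/zestaw_1/zadania_2D.py | ile_liczb_silni
-- ===== SOURCE A (Python) =====
-- def ile_liczb_silni(tablica):
--     licznik = 0
--     for liczba in tablica:
--         silnia = 1
--         k = 1
--         while silnia <= liczba:
--             if silnia == liczba:
--                 licznik += 1
--             k += 1
--             silnia *= k
--     return licznik
-- ===== SOURCE B (Python) =====
-- def ile_liczb_silni(tablica):
--     licznik = 0
--     for liczba in tablica:
--         if liczba < 1:
--             continue
--         x = liczba
--         i = 2
--         while x % i == 0: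
--             x //= i
--             i += 1
--         if x == 1:
--             licznik += 1
--     return licznik
-- ===== Notes on version B (the rewrite author's own statement) =====
-- stated objective: alternative
-- what changed: A tests each element by generating the factorial sequence 1,2,6,... upward by multiplication until it passes the element; B instead factorizes each element downward by trial division (x //= i for i = 2,3,...) and counts it iff the quotient reaches exactly 1, skipping non-positive elements outright.
import Mathlib
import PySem

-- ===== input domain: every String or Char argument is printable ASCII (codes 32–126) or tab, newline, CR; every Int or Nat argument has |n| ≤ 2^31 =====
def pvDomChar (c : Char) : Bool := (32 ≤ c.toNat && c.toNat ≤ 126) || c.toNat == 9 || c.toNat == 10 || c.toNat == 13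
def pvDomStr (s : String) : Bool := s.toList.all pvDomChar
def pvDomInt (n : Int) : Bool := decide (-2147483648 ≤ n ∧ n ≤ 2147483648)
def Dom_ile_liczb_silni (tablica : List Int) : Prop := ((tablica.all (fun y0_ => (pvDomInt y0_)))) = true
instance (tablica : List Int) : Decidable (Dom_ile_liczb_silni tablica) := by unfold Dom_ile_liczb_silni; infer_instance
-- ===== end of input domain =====

-- B replaces A's upward factorial generation by downward trial division of each element; objective: alternative algorithm, same cost.

-- ===== PORT A =====
-- inner while loop of A; the '1 ≤ silnia ∧ 1 ≤ k' conjuncts are a totality guard only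
-- (they hold at the initial state silnia = k = 1 and are preserved), the Python condition is 'silnia ≤ liczba'
def aLoop (liczba silnia k : Int) : Int :=
  if h : silnia ≤ liczba ∧ 1 ≤ silnia ∧ 1 ≤ k then
    (if silnia = liczba then 1 else 0) + aLoop liczba (silnia * (k + 1)) (k + 1)
  else 0
termination_by (liczba + 1 - silnia).toNat
decreasing_by
  have h2 : silnia * 2 ≤ silnia * (k + 1) :=
    mul_le_mul_of_nonneg_left (by omega) (by omega)
  omega

def ile_liczb_silni (tablica : List Int) : Int :=
  tablica.foldl (fun licznik liczba => licznik + aLoop liczba 1 1) 0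

-- ===== PORT B =====
-- inner while loop of B; the '1 ≤ x ∧ 2 ≤ i' conjuncts are a totality guard only
-- (they hold at the initial state x = liczba ≥ 1, i = 2 and are preserved), the Python condition is 'x % i == 0'
def bLoop (x i : Int) : Int :=
  if h : PySem.Int.mod x i = 0 ∧ 1 ≤ x ∧ 2 ≤ i then
    bLoop (PySem.Int.floordiv x i) (i + 1)
  else x
termination_by x.toNat
decreasing_by
  obtain ⟨hm, hx, hi⟩ := h
  have hd : i ∣ x := (PySem.Int.mod_eq_zero_iff_dvd x i).mp hm
  obtain ⟨q, hq⟩ := hd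
  have hipos : (0:Int) < i := by omega
  have hfd : PySem.Int.floordiv x i = q := by
    rw [PySem.Int.floordiv_eq_ediv_of_pos hipos, hq, Int.mul_ediv_cancel_left _ (by omega)]
  have hq1 : 1 ≤ q := by nlinarith
  have hqx : q < x := by nlinarith
  rw [hfd]; omega

def ile_liczb_silni_alt (tablica : List Int) : Int :=
  tablica.foldl
    (fun licznik liczba =>
      if liczba < 1 then licznik
      else if bLoop liczba 2 = 1 then licznik + 1 else licznik)
    0

-- ===== PRECONDITION & SPEC =====
def Spec_ile_liczb_silni (tablica : List Int) (out : Int) : Prop := out = ile_liczb_silni_alt tablica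
instance (tablica : List Int) (out : Int) : Decidable (Spec_ile_liczb_silni tablica out) := by unfold Spec_ile_liczb_silni; infer_instance

-- ===== CLAIM (what is proved, stated in full; the proofs are below) =====
def Claim_equal_ile_liczb_silni : Prop := ∀ (tablica : List Int), Dom_ile_liczb_silni tablica → Spec_ile_liczb_silni tablica (ile_liczb_silni tablica)

-- ===== LEMMAS AND PROOFS =====

-- A's loop returns 0 once silnia has overshot liczba
theorem aLoop_of_gt {liczba silnia k : Int} (h : liczba < silnia) : aLoop liczba silnia k = 0 := by
  rw [aLoop, dif_neg]; omega

-- A's loop returns 0 when silnia does not divide liczba: every later value of silnia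
-- is a multiple of the current one, so none can equal liczba
theorem aLoop_of_not_dvd (liczba silnia k : Int) (hs : 1 ≤ silnia)
    (hnd : ¬ silnia ∣ liczba) : aLoop liczba silnia k = 0 := by
  by_cases h : silnia ≤ liczba ∧ 1 ≤ silnia ∧ 1 ≤ k
  · obtain ⟨hle, -, hk⟩ := h
    have hne : silnia ≠ liczba := fun he => hnd ⟨1, by omega⟩
    have hs' : 1 ≤ silnia * (k + 1) := by nlinarith
    have hnd' : ¬ silnia * (k + 1) ∣ liczba := fun hd => hnd (dvd_trans ⟨k + 1, rfl⟩ hd)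
    rw [aLoop, dif_pos ⟨hle, by omega, hk⟩, if_neg hne,
      aLoop_of_not_dvd liczba (silnia * (k + 1)) (k + 1) hs' hnd', zero_add]
  · rw [aLoop, dif_neg h]
termination_by (liczba + 1 - silnia).toNat
decreasing_by
  have h2 : silnia * 2 ≤ silnia * (k + 1) :=
    mul_le_mul_of_nonneg_left (by omega) (by omega)
  omega

-- the per-element bridge: A at state (silnia = s, k) on value s * x behaves like B at state (x, k + 1)
theorem aLoop_eq_bLoop (x : Int) (s k : Int) (hx : 1 ≤ x) (hs : 1 ≤ s) (hk : 1 ≤ k) :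
    aLoop (s * x) s k = if bLoop x (k + 1) = 1 then 1 else 0 := by
  by_cases hx1 : x = 1
  · subst hx1
    rw [bLoop, dif_neg]
    · rw [aLoop, dif_pos (by constructor <;> omega)]
      rw [aLoop_of_gt (by nlinarith)]
      simp [mul_one]
    · have hm1 : PySem.Int.mod 1 (k + 1) = 1 := by
        rw [PySem.Int.mod_eq_emod_of_pos (by omega)]
        exact Int.emod_eq_of_lt (by omega) (by omega)
      intro h; omega
  · by_cases hdvd : (k + 1) ∣ x
    · obtain ⟨q, hq⟩ := hdvd
      have hq1 : 1 ≤ q := by nlinarith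
      have hqx : q < x := by nlinarith
      have hmod : PySem.Int.mod x (k + 1) = 0 :=
        (PySem.Int.mod_eq_zero_iff_dvd x (k + 1)).mpr ⟨q, hq⟩
      have hfd : PySem.Int.floordiv x (k + 1) = q := by
        rw [PySem.Int.floordiv_eq_ediv_of_pos (by omega), hq,
          Int.mul_ediv_cancel_left _ (by omega)]
      rw [bLoop, dif_pos ⟨hmod, by omega, by omega⟩, hfd]
      rw [aLoop, dif_pos ⟨by nlinarith, hs, hk⟩]
      have hne : s ≠ s * x := by nlinarith
      have : s * x = (s * (k + 1)) * q := by rw [hq]; ring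
      rw [this, aLoop_eq_bLoop q (s * (k + 1)) (k + 1) hq1 (by nlinarith) (by omega)]
      have hne2 : s ≠ s * (k + 1) * q := by rw [← this]; exact hne
      rw [if_neg hne2, zero_add]
    · have hmod : PySem.Int.mod x (k + 1) ≠ 0 := fun h =>
        hdvd ((PySem.Int.mod_eq_zero_iff_dvd x (k + 1)).mp h)
      rw [bLoop, dif_neg (by intro h; exact hmod h.1)]
      have hnd : ¬ s * (k + 1) ∣ s * x := by
        intro h
        exact hdvd ((mul_dvd_mul_iff_left (by omega : s ≠ 0)).mp h)
      rw [aLoop, dif_pos ⟨by nlinarith, hs, hk⟩]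
      rw [aLoop_of_not_dvd (s * x) (s * (k + 1)) (k + 1) (by nlinarith) hnd]
      have hmul : s * 2 ≤ s * x := mul_le_mul_of_nonneg_left (by omega) (by omega)
      have hne : s ≠ s * x := by intro he; rw [← he] at hmul; omega
      rw [if_neg hne, if_neg hx1, add_zero]
termination_by x.toNat
decreasing_by omega

-- per element the two bodies agree
theorem elem_eq (liczba : Int) :
    aLoop liczba 1 1 = (if liczba < 1 then 0 else if bLoop liczba 2 = 1 then 1 else 0) := by
  by_cases h : liczba < 1
  · rw [aLoop_of_gt h]; simp [h]
  · have := aLoop_eq_bLoop liczba 1 1 (by omega) le_rfl le_rfl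
    rw [one_mul] at this
    rw [this]; simp [h]

theorem fold_eq (tablica : List Int) (acc : Int) :
    tablica.foldl (fun licznik liczba => licznik + aLoop liczba 1 1) acc =
      tablica.foldl
        (fun licznik liczba =>
          if liczba < 1 then licznik
          else if bLoop liczba 2 = 1 then licznik + 1 else licznik) acc := by
  induction tablica generalizing acc with
  | nil => rfl
  | cons hd tl ih =>
    simp only [List.foldl_cons, elem_eq hd]
    rw [ih]
    congr 1
    split_ifs <;> omega

-- ===== VERDICT (by name: the statement is the Claim_ definition above) =====
theorem ile_liczb_silni_spec : Claim_equal_ile_liczb_silni := by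
  intro tablica _
  unfold Spec_ile_liczb_silni ile_liczb_silni ile_liczb_silni_alt
  exact fold_eq tablica 0
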